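-- pv_equiv track=rewrite | github.com/flycatcher/relue-tcejorp | p054/src/solution.py | win_by_straight
-- ===== SOURCE A (Python) =====
-- def is_straight(cards):
--     faces = 'AKQJT98765432A'
--     c = set(x[0] for x in cards)
--     for idx in range(len(faces) - 5):
--         s = set(x for x in faces[idx:idx + 5])
--         if s == c:
--             return True
--     return False
--
-- def win_by_straight(first, second):
--     f = is_straight(first)
--     s = is_straight(second)
--     if f and not s:
--         return 1
--     elif s and not f:
--         return -1
--     else:
--         faces = 'AKQJT98765432A'
--         f = set(x[0] for x in first)
--         s = set(x[0] for x in second)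
--         for idx in range(len(faces) - 5):
--             c = set(x for x in faces[idx:idx + 5])
--             if c == f and c != s:
--                 return 1
--             elif c != f and c == s:
--                 return -1
--     return 0
-- ===== SOURCE B (Python) =====
-- def straight_rank(cards):
--     faces = 'AKQJT98765432A'
--     c = set(x[0] for x in cards)
--     for idx in range(len(faces) - 5):
--         if set(faces[idx:idx + 5]) == c:
--             return 9 - idx
--     return 0
--
-- def win_by_straight(first, second):
--     rf = straight_rank(first)
--     rs = straight_rank(second)
--     return (rf > rs) - (rf < rs)
-- ===== Notes on version B (the rewrite author's own statement) =====
-- stated objective: simpler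
-- what changed: Replaced A's two is_straight scans plus a separate three-way re-scanning comparison loop by a single straight_rank helper (one window scan per hand returning 9-idx, 0 if none) and a direct sign comparison of the two ranks.
import Mathlib
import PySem

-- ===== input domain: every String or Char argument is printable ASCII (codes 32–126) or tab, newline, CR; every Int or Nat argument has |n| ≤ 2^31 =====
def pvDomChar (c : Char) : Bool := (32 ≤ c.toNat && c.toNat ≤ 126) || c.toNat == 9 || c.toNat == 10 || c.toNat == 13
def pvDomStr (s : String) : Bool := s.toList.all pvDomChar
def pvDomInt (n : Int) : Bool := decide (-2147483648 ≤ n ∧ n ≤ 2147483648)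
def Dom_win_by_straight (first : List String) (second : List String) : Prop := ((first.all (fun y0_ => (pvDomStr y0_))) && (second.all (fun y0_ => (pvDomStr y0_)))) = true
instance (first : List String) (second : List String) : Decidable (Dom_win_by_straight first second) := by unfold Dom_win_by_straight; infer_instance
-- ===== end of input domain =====

-- B collapses A's two is_straight scans plus a separate three-way comparison loop into one
-- rank-per-hand window scan and a direct sign comparison (objective: simpler).


-- ===== PORT A =====
-- faces = 'AKQJT98765432A' (shared literal of both Pythons)
def pvFaces : List Char := "AKQJT98765432A".toList

-- set(x for x in faces[idx:idx+5])
def pvWindow (idx : Int) : PySem.Set Char :=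
  PySem.Set.ofList (PySem.List.slice pvFaces (some idx) (some (idx + 5)))

-- set(x[0] for x in cards); none exactly where some x[0] raises IndexError (x = "")
def pvHeadSet? (cards : List String) : Option (PySem.Set Char) :=
  (cards.mapM (fun x => PySem.Str.pyGet? x 0)).map PySem.Set.ofList

-- the 'for idx in range(len(faces)-5): if s == c: return True' loop of is_straight
def isStraightLoop (c : PySem.Set Char) : List Int → Bool
  | [] => false
  | idx :: rest =>
      if PySem.Set.equal (pvWindow idx) c then true else isStraightLoop c rest

-- the else-branch loop of win_by_straight: first window deciding the tie
def winLoop (f s : PySem.Set Char) : List Int → Int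
  | [] => 0
  | idx :: rest =>
      let c := pvWindow idx
      if PySem.Set.equal c f && !PySem.Set.equal c s then 1
      else if !PySem.Set.equal c f && PySem.Set.equal c s then -1
      else winLoop f s rest

def win_by_straight (first : List String) (second : List String) : Int :=
  match pvHeadSet? first, pvHeadSet? second with
  | some cf, some cs =>
      let f := isStraightLoop cf (PySem.List.pyRange 0 9 1)
      let s := isStraightLoop cs (PySem.List.pyRange 0 9 1)
      if f && !s then 1
      else if s && !f then -1
      else winLoop cf cs (PySem.List.pyRange 0 9 1)
  | _, _ => 0  -- unreachable under Pre_ (IndexError in Python)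

-- ===== PORT B =====
def pvFacesB : List Char := "AKQJT98765432A".toList

-- set(faces[idx:idx+5])
def pvWindowB (idx : Int) : PySem.Set Char :=
  PySem.Set.ofList (PySem.List.slice pvFacesB (some idx) (some (idx + 5)))

-- set(x[0] for x in cards); none exactly where some x[0] raises IndexError (x = "")
def pvHeadSetB? (cards : List String) : Option (PySem.Set Char) :=
  (cards.mapM (fun x => PySem.Str.pyGet? x 0)).map PySem.Set.ofList

-- straight_rank's loop: first matching window idx gives 9 - idx, else 0
def rankLoop (c : PySem.Set Char) : List Int → Int
  | [] => 0
  | idx :: rest =>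
      if PySem.Set.equal (pvWindowB idx) c then 9 - idx else rankLoop c rest

def straightRank? (cards : List String) : Option Int :=
  (pvHeadSetB? cards).map (fun c => rankLoop c (PySem.List.pyRange 0 9 1))

def win_by_straight_alt (first : List String) (second : List String) : Int :=
  match straightRank? first with
  | none => 0  -- unreachable under Pre_ (IndexError in Python)
  | some rf =>
      match straightRank? second with
      | none => 0  -- unreachable under Pre_ (IndexError in Python)
      | some rs => (if rf > rs then (1 : Int) else 0) - (if rf < rs then (1 : Int) else 0)

-- ===== PRECONDITION & SPEC =====
-- Pre_ excludes hands containing an empty string: there both Pythons raise IndexError on x[0].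
def Pre_win_by_straight (first : List String) (second : List String) : Prop :=
  (∀ x ∈ first, x ≠ "") ∧ (∀ x ∈ second, x ≠ "")
instance (first : List String) (second : List String) : Decidable (Pre_win_by_straight first second) := by
  unfold Pre_win_by_straight; infer_instance
def pvWitness_win_by_straight : List String × List String :=
  (["2h", "3h", "4h", "5h", "6h"], ["Ks", "Kd", "2c", "3c", "4c"])

def Spec_win_by_straight (first : List String) (second : List String) (out : Int) : Prop := out = win_by_straight_alt first second
instance (first : List String) (second : List String) (out : Int) : Decidable (Spec_win_by_straight first second out) := by unfold Spec_win_by_straight; infer_instance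

-- ===== CLAIM (what is proved, stated in full; the proofs are below) =====
def Claim_equal_win_by_straight : Prop := ∀ (first : List String) (second : List String), Dom_win_by_straight first second → Pre_win_by_straight first second → Spec_win_by_straight first second (win_by_straight first second)

-- ===== LEMMAS AND PROOFS =====

-- the two ports build the same window sets and head sets (same Python literal / expression)
theorem pvWindowB_eq (idx : Int) : pvWindowB idx = pvWindow idx := rfl
theorem pvHeadSetB?_eq (cards : List String) : pvHeadSetB? cards = pvHeadSet? cards := rfl

-- under Pre_, set(x[0] for x in cards) is built without an IndexError
theorem pvHeads_isSome (cards : List String) (h : ∀ x ∈ cards, x ≠ "") :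
    ∃ l, cards.mapM (fun x => PySem.Str.pyGet? x 0) = some l := by
  induction cards with
  | nil => exact ⟨[], rfl⟩
  | cons x xs ih =>
      obtain ⟨l, hl⟩ := ih (fun y hy => h y (List.mem_cons_of_mem _ hy))
      have hx : x ≠ "" := h x List.mem_cons_self
      have hne : x.toList ≠ [] := fun hc => hx (String.toList_eq_nil_iff.mp hc)
      obtain ⟨ch, cs, hcs⟩ := List.exists_cons_of_ne_nil hne
      have hget : PySem.Chars.pyGet? x.toList 0 = some ch := by
        rw [hcs]; simp [PySem.Chars.pyGet?, PySem.List.pyGet?, PySem.List.pyIdx?]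
      refine ⟨ch :: l, ?_⟩
      simp only [List.mapM_cons, PySem.Str.pyGet?] at hl ⊢
      rw [hget, hl]
      rfl

theorem pvHeadSet?_isSome (cards : List String) (h : ∀ x ∈ cards, x ≠ "") :
    ∃ c, pvHeadSet? cards = some c := by
  obtain ⟨l, hl⟩ := pvHeads_isSome cards h
  unfold pvHeadSet?
  rw [hl]
  exact ⟨_, rfl⟩

-- no straight ⇒ rank 0
theorem rankLoop_of_not_straight (c : PySem.Set Char) (L : List Int)
    (h : isStraightLoop c L = false) : rankLoop c L = 0 := by
  induction L with
  | nil => rfl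
  | cons idx rest ih =>
      by_cases he : PySem.Set.equal (pvWindow idx) c
      · simp [isStraightLoop, he] at h
      · simp [isStraightLoop, he] at h
        simp [rankLoop, pvWindowB_eq, he, ih h]

-- straight ⇒ positive rank (all indices below 9)
theorem rankLoop_pos_of_straight (c : PySem.Set Char) (L : List Int)
    (hb : ∀ x ∈ L, x < 9) (h : isStraightLoop c L = true) : 0 < rankLoop c L := by
  induction L with
  | nil => simp [isStraightLoop] at h
  | cons idx rest ih =>
      by_cases he : PySem.Set.equal (pvWindow idx) c
      · have := hb idx List.mem_cons_self
        simp [rankLoop, pvWindowB_eq, he]; omega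
      · simp [isStraightLoop, he] at h
        have := ih (fun x hx => hb x (List.mem_cons_of_mem _ hx)) h
        simpa [rankLoop, pvWindowB_eq, he] using this

-- upper bound: every rank taken over indices above idx stays below 9 - idx
theorem rankLoop_lt (c : PySem.Set Char) (L : List Int) (idx : Int)
    (hlt : ∀ x ∈ L, idx < x) (h9 : idx < 9) : rankLoop c L < 9 - idx := by
  induction L with
  | nil => simp [rankLoop]; omega
  | cons j rest ih =>
      have hj := hlt j List.mem_cons_self
      by_cases he : PySem.Set.equal (pvWindow j) c
      · simp [rankLoop, pvWindowB_eq, he]; omega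
      · simp [rankLoop, pvWindowB_eq, he]
        exact ih (fun x hx => hlt x (List.mem_cons_of_mem _ hx))

-- equal hands never decide the tie loop
theorem winLoop_of_equal (f s : PySem.Set Char) (L : List Int)
    (h : ∀ x, x ∈ f ↔ x ∈ s) : winLoop f s L = 0 := by
  induction L with
  | nil => rfl
  | cons idx rest ih =>
      have hiff : PySem.Set.equal (pvWindow idx) f = PySem.Set.equal (pvWindow idx) s := by
        by_cases hf : PySem.Set.equal (pvWindow idx) f
        · have hm := (PySem.Set.equal_iff _ _).mp hf
          have hs : PySem.Set.equal (pvWindow idx) s = true :=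
            (PySem.Set.equal_iff _ _).mpr (fun x => (hm x).trans (h x))
          simp [hf, hs]
        · have hs : PySem.Set.equal (pvWindow idx) s ≠ true := fun hc => hf
            ((PySem.Set.equal_iff _ _).mpr (fun x =>
              (((PySem.Set.equal_iff _ _).mp hc) x).trans (h x).symm))
          simp [hf, eq_false_of_ne_true hs]
      simp only [winLoop]
      rw [← hiff]
      simp [ih]

-- the tie loop computes the sign of the rank difference
theorem winLoop_eq_sign (f s : PySem.Set Char) (L : List Int)
    (hp : L.Pairwise (· < ·)) (hb : ∀ x ∈ L, x < 9) :
    winLoop f s L =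
      (if rankLoop f L > rankLoop s L then (1 : Int) else 0)
      - (if rankLoop f L < rankLoop s L then (1 : Int) else 0) := by
  induction L with
  | nil => simp [winLoop, rankLoop]
  | cons idx rest ih =>
      have h9 : idx < 9 := hb idx List.mem_cons_self
      have hgt : ∀ x ∈ rest, idx < x := fun x hx => (List.pairwise_cons.mp hp).1 x hx
      have hb' : ∀ x ∈ rest, x < 9 := fun x hx => hb x (List.mem_cons_of_mem _ hx)
      by_cases hf : PySem.Set.equal (pvWindow idx) f
      · by_cases hs : PySem.Set.equal (pvWindow idx) s
        · -- both hands are this straight: equal sets, rank ties at 9 - idx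
          have hiff : ∀ x, x ∈ f ↔ x ∈ s := fun x =>
            (((PySem.Set.equal_iff _ _).mp hf) x).symm.trans
              (((PySem.Set.equal_iff _ _).mp hs) x)
          simp [winLoop, rankLoop, pvWindowB_eq, hf, hs, winLoop_of_equal f s rest hiff]
        · have hr : rankLoop s (idx :: rest) < 9 - idx := by
            simp [rankLoop, pvWindowB_eq, hs]
            exact rankLoop_lt s rest idx hgt h9
          simp [winLoop, rankLoop, pvWindowB_eq, hf, hs] at hr ⊢
          omega
      · by_cases hs : PySem.Set.equal (pvWindow idx) s
        · have hr : rankLoop f (idx :: rest) < 9 - idx := by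
            simp [rankLoop, pvWindowB_eq, hf]
            exact rankLoop_lt f rest idx hgt h9
          simp [winLoop, rankLoop, pvWindowB_eq, hf, hs] at hr ⊢
          omega
        · simpa [winLoop, rankLoop, pvWindowB_eq, hf, hs] using
            ih (List.pairwise_cons.mp hp).2 hb'

theorem pvCore_eq (cf cs : PySem.Set Char) :
    (let f := isStraightLoop cf (PySem.List.pyRange 0 9 1)
     let s := isStraightLoop cs (PySem.List.pyRange 0 9 1)
     if f && !s then (1 : Int)
     else if s && !f then -1
     else winLoop cf cs (PySem.List.pyRange 0 9 1)) =
    (if rankLoop cf (PySem.List.pyRange 0 9 1) > rankLoop cs (PySem.List.pyRange 0 9 1)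
       then (1 : Int) else 0)
    - (if rankLoop cf (PySem.List.pyRange 0 9 1) < rankLoop cs (PySem.List.pyRange 0 9 1)
       then (1 : Int) else 0) := by
  have hp : (PySem.List.pyRange 0 9 1).Pairwise (· < ·) := by decide
  have hb : ∀ x ∈ PySem.List.pyRange 0 9 1, x < 9 := by decide
  by_cases hf : isStraightLoop cf (PySem.List.pyRange 0 9 1)
  · by_cases hs : isStraightLoop cs (PySem.List.pyRange 0 9 1)
    · simpa [hf, hs] using winLoop_eq_sign cf cs _ hp hb
    · have h1 := rankLoop_pos_of_straight cf _ hb hf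
      have h2 := rankLoop_of_not_straight cs _ (by simpa using hs)
      simp [hf, hs, h2]
      omega
  · by_cases hs : isStraightLoop cs (PySem.List.pyRange 0 9 1)
    · have h1 := rankLoop_pos_of_straight cs _ hb hs
      have h2 := rankLoop_of_not_straight cf _ (by simpa using hf)
      simp [hf, hs, h2]
      omega
    · have h1 := rankLoop_of_not_straight cf _ (by simpa using hf)
      have h2 := rankLoop_of_not_straight cs _ (by simpa using hs)
      simpa [hf, hs, h1, h2] using winLoop_eq_sign cf cs _ hp hb

-- ===== VERDICT (by name: the statement is the Claim_ definition above) =====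
theorem win_by_straight_spec : Claim_equal_win_by_straight := by
  intro first second _ hpre
  obtain ⟨cf, hcf⟩ := pvHeadSet?_isSome first hpre.1
  obtain ⟨cs, hcs⟩ := pvHeadSet?_isSome second hpre.2
  simp only [Spec_win_by_straight, win_by_straight, win_by_straight_alt, straightRank?,
    pvHeadSetB?_eq, hcf, hcs, Option.map_some]
  exact pvCore_eq cf cs
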